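-- pv_equiv track=rewrite | github.com/js2493/TrojanScheduler | get_course_data/utility/day_utility.py | encode_days
-- ===== SOURCE A (Python) =====
-- DAY_LIST = ["Sunday", "Monday", "Tuesday", "Wednesday", "Thursday", "Friday", "Saturday"]
--
-- def encode_days(days_string):
--     if days_string.lower() == "tba":
--         return 0
--     splits = [ind for ind, letter in enumerate(days_string) if letter.isupper()]
--     parts = [days_string[i:j] for i, j in zip(splits, splits[1:] + [None])]
--     days = set([part[0] if part[0].lower() != "t" else part[:2] for part in parts])
--
--     values = {(day.lower().strip()[:1] if day.lower()[0] != "t" else day.lower().strip()[:2]): 2 ** i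
--               for i, day in enumerate(DAY_LIST)}
--     try:
--         return sum(values[day.lower()] for day in days)
--     except KeyError:
--         return 0
-- ===== SOURCE B (Python) =====
-- def encode_days(days_string):
--     # One left-to-right pass: at each ASCII-uppercase position derive the key
--     # directly from (that char, following char); dedup with a set on the fly.
--     if days_string.lower() == "tba":
--         return 0
--     values = {'s': 64, 'm': 2, 'tu': 4, 'w': 8, 'th': 16, 'f': 32}
--     total = 0
--     seen = set()
--     n = len(days_string)
--     for i, c in enumerate(days_string):
--         if 'A' <= c <= 'Z':
--             key = c.lower()
--             if key == 't' and i + 1 < n and not ('A' <= days_string[i + 1] <= 'Z'):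
--                 key = 't' + days_string[i + 1].lower()
--             if key not in values:
--                 return 0
--             if key not in seen:
--                 seen.add(key)
--                 total += values[key]
--     return total
-- ===== Notes on version B (the rewrite author's own statement) =====
-- stated objective: simpler
-- what changed: B replaces A's four-stage pipeline (uppercase-index list, zip-with-shifted-list slicing into parts, set of token prefixes, dict comprehension rebuilt per call) with a single left-to-right scan that derives each day key directly from an uppercase character and its successor, deduplicating and summing on the fly with an early return on an unknown key.
import Mathlib
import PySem

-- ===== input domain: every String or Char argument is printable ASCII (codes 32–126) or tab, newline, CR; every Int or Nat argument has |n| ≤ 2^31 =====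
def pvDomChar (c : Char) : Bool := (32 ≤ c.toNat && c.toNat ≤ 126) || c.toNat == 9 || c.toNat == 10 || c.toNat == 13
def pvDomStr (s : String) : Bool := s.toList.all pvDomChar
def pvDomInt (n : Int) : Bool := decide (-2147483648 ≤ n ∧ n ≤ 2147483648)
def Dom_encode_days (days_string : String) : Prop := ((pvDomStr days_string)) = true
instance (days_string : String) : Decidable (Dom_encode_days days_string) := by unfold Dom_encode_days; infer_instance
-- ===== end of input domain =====

-- B replaces A's splits/zip/slice tokenization pipeline and trailing dict comprehension by a
-- single left-to-right pass that derives each key directly from (uppercase char, following char)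
-- and dedups/sums on the fly (objective: simpler one-pass decomposition; same return values).

-- ===== PORT A =====
def pvDayList : List String := ["Sunday", "Monday", "Tuesday", "Wednesday", "Thursday", "Friday", "Saturday"]

-- values = {(day.lower().strip()[:1] if day.lower()[0] != "t" else day.lower().strip()[:2]): 2**i for i, day in enumerate(DAY_LIST)}
-- keys kept as List Char; day.lower()[0] never raises (DAY_LIST entries nonempty) so pyGetD's default is unreachable;
-- 2**i ported as 2 ^ i.toNat (exact: enumerate indices are ≥ 0).
def pvValues : PySem.Dict (List Char) Int :=
  (PySem.List.enumerate pvDayList).foldl (fun d p =>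
    let low := PySem.Chars.lower p.2.toList
    let key := if PySem.List.pyGetD low 0 ' ' ≠ 't'
               then PySem.List.slice (PySem.Chars.strip low) none (some 1)
               else PySem.List.slice (PySem.Chars.strip low) none (some 2)
    PySem.Dict.insert d key ((2:Int) ^ p.1.toNat)) PySem.Dict.empty

-- part[0] if part[0].lower() != "t" else part[:2]; parts are always nonempty (each starts at an
-- uppercase index), so pyGetD's default is unreachable.
def pvKeyOfPart (part : List Char) : List Char :=
  if PySem.Chars.lower [PySem.List.pyGetD part 0 ' '] ≠ ['t']
  then [PySem.List.pyGetD part 0 ' ']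
  else PySem.List.slice part none (some 2)

def encode_days (days_string : String) : Int :=
  if PySem.Str.lower days_string == "tba" then 0
  else
    let s := days_string.toList
    -- splits = [ind for ind, letter in enumerate(days_string) if letter.isupper()]
    let splits : List Int := ((PySem.List.enumerate s).filter (fun p => PySem.Chars.isupper p.2)).map (fun p => p.1)
    -- parts = [days_string[i:j] for i, j in zip(splits, splits[1:] + [None])]
    let parts : List (List Char) := (splits.zip ((splits.drop 1).map some ++ [none])).map
        (fun ij => PySem.List.slice s (some ij.1) ij.2)
    -- days = set([...])
    let days : PySem.Set (List Char) := PySem.Set.ofList (parts.map pvKeyOfPart)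
    -- try: return sum(values[day.lower()] for day in days)  except KeyError: return 0
    -- (sum over a Python set: order-irrelevant, Int addition is commutative; KeyError ↔ some lookup is none)
    match days.mapM (fun day => PySem.Dict.get? pvValues (PySem.Chars.lower day)) with
    | some vs => vs.sum
    | none => 0

-- ===== PORT B =====
def pvAltValues : PySem.Dict (List Char) Int :=
  PySem.Dict.ofList [(['s'], 64), (['m'], 2), (['t','u'], 4), (['w'], 8), (['t','h'], 16), (['f'], 32)]

-- 'A' <= c <= 'Z'
def pvAltIsUpper (c : Char) : Bool := decide ('A' ≤ c) && decide (c ≤ 'Z')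

-- the for-loop of Source B with its early `return 0` (i is the enumerate index)
def pvAltLoop (s : List Char) (i : Nat) (seen : PySem.Set (List Char)) (total : Int) : Int :=
  if h : i < s.length then
    let c := s[i]
    if pvAltIsUpper c then
      let key0 : List Char := [PySem.Chars.lowerChar c]
      let key : List Char :=
        if h2 : i + 1 < s.length then
          if key0 = ['t'] ∧ ¬ pvAltIsUpper s[i+1] then ['t', PySem.Chars.lowerChar s[i+1]] else key0
        else key0
      match PySem.Dict.get? pvAltValues key with
      | none => 0
      | some v =>
        if key ∈ seen then pvAltLoop s (i+1) seen total
        else pvAltLoop s (i+1) (PySem.Set.add seen key) (total + v)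
    else pvAltLoop s (i+1) seen total
  else total
termination_by s.length - i

def encode_days_alt (days_string : String) : Int :=
  if PySem.Str.lower days_string == "tba" then 0
  else pvAltLoop days_string.toList 0 [] 0

-- ===== PRECONDITION & SPEC =====
def Spec_encode_days (days_string : String) (out : Int) : Prop := out = encode_days_alt days_string
instance (days_string : String) (out : Int) : Decidable (Spec_encode_days days_string out) := by unfold Spec_encode_days; infer_instance

-- ===== CLAIM (what is proved, stated in full; the proofs are below) =====
def Claim_equal_encode_days : Prop := ∀ (days_string : String), Dom_encode_days days_string → Spec_encode_days days_string (encode_days days_string)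

-- ===== LEMMAS AND PROOFS =====

def pvUpsFrom (s : List Char) (i : Nat) : List Nat :=
  (List.range' i (s.length - i)).filter (fun k => PySem.Chars.isupper (s.getD k ' '))

theorem pvEnumFilter (s : List Char) (k : Nat) :
    ((PySem.List.enumerate s (k:Int)).filter (fun p => PySem.Chars.isupper p.2)).map (fun p => p.1)
    = ((List.range s.length).filter (fun j => PySem.Chars.isupper (s.getD j ' '))).map (fun j => ((k + j : Nat) : Int)) := by
  induction s generalizing k with
  | nil => simp [PySem.List.enumerate]
  | cons c t ih =>
    rw [PySem.List.enumerate_cons]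
    have hk : ((k:Int) + 1) = ((k+1 : Nat) : Int) := by push_cast; ring
    rw [hk]
    simp only [List.length_cons, List.range_succ_eq_map, List.filter_cons, List.getD_cons_zero]
    have htail : List.map (fun j => ((k + j : Nat) : Int))
          (List.filter (fun j => PySem.Chars.isupper ((c :: t).getD j ' ')) (List.map Nat.succ (List.range t.length)))
        = List.map (fun j => (((k+1) + j : Nat) : Int))
          (List.filter (fun j => PySem.Chars.isupper (t.getD j ' ')) (List.range t.length)) := by
      rw [List.filter_map, List.map_map]
      rw [List.filter_congr (q := fun j => PySem.Chars.isupper (t.getD j ' ')) ?hp]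
      case hp => intro x hx; simp [Function.comp]
      apply List.map_congr_left
      intro a ha; simp [Function.comp]; ring
    by_cases h : PySem.Chars.isupper c
    · simp only [h, if_pos, List.map_cons, ih, htail]
      simp
    · simp only [h, Bool.false_eq_true, if_false, ih, htail]

theorem pvUpsFrom_zero (s : List Char) :
    pvUpsFrom s 0 = (List.range s.length).filter (fun k => PySem.Chars.isupper (s.getD k ' ')) := by
  simp [pvUpsFrom, List.range_eq_range']

theorem pvMem_ups (s : List Char) (i k : Nat) :
    k ∈ pvUpsFrom s i ↔ i ≤ k ∧ k < s.length ∧ PySem.Chars.isupper (s.getD k ' ') := by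
  simp only [pvUpsFrom, List.mem_filter, List.mem_range'_1]
  constructor
  · rintro ⟨⟨h1, h2⟩, h3⟩; exact ⟨h1, by omega, h3⟩
  · rintro ⟨h1, h2, h3⟩; exact ⟨⟨h1, by omega⟩, h3⟩

theorem pvPairwise_ups (s : List Char) (i : Nat) : (pvUpsFrom s i).Pairwise (· < ·) :=
  List.Pairwise.filter _ (List.pairwise_lt_range' 1)

theorem pvUpsFrom_step (s : List Char) (i : Nat) (h : i < s.length) :
    pvUpsFrom s i = if PySem.Chars.isupper (s.getD i ' ')
      then i :: pvUpsFrom s (i+1) else pvUpsFrom s (i+1) := by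
  unfold pvUpsFrom
  have h2 : s.length - i = (s.length - (i+1)) + 1 := by omega
  rw [h2, List.range'_succ, List.filter_cons]

theorem pvUpsFrom_end (s : List Char) (i : Nat) (h : s.length ≤ i) : pvUpsFrom s i = [] := by
  unfold pvUpsFrom
  have h2 : s.length - i = 0 := by omega
  simp [h2]

theorem pvUpperLe (c : Char) (h : PySem.Chars.isupper c = true) : 65 ≤ c.toNat ∧ c.toNat ≤ 90 := by
  unfold PySem.Chars.isupper at h; simp at h
  exact ⟨h.1, h.2⟩

theorem pvLowerChar_eq_t_iff (c : Char) (h : PySem.Chars.isupper c = true) :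
    PySem.Chars.lowerChar c = 't' ↔ c = 'T' := by
  obtain ⟨h1, h2⟩ := pvUpperLe c h
  unfold PySem.Chars.lowerChar
  rw [if_pos h]
  have hv : (c.toNat + 32).isValidChar := Or.inl (by omega)
  constructor
  · intro he
    have ht : (Char.ofNat (c.toNat + 32)).toNat = 't'.toNat := by rw [he]
    rw [Char.toNat_ofNat, if_pos hv] at ht
    have ht' : 't'.toNat = 116 := by decide
    have hT : c.toNat = 'T'.toNat := by rw [show 'T'.toNat = 84 from by decide]; omega
    exact Char.ext (UInt32.toNat_inj.mp hT)
  · intro he; subst he; decide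

theorem pvLowerChar_not_upper (c : Char) (h : ¬ PySem.Chars.isupper c = true) :
    PySem.Chars.lowerChar c = c := by
  unfold PySem.Chars.lowerChar; rw [if_neg h]

theorem pvKeyOfPart_singleton (c : Char) : pvKeyOfPart [c] = [c] := by
  unfold pvKeyOfPart
  have h2 : PySem.List.slice [c] none (some 2) = [c] := by
    rw [PySem.List.slice_to _ (by norm_num)]; rfl
  have h0 : PySem.List.pyGetD [c] 0 ' ' = c := by simp [pysem]
  rw [h0, h2]
  split <;> rfl

theorem pvKeyOfPart_cons_cons (c d : Char) (r : List Char) :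
    pvKeyOfPart (c :: d :: r) = if PySem.Chars.lowerChar c = 't' then [c, d] else [c] := by
  unfold pvKeyOfPart
  have h0 : PySem.List.pyGetD (c :: d :: r) 0 ' ' = c := by simp [pysem]
  have h2 : PySem.List.slice (c :: d :: r) none (some 2) = [c, d] := by
    rw [PySem.List.slice_to _ (by norm_num)]
    rfl
  rw [h0, h2]
  have hl : PySem.Chars.lower [c] = [PySem.Chars.lowerChar c] := rfl
  rw [hl]
  by_cases h : PySem.Chars.lowerChar c = 't'
  · simp [h]
  · simp [h]

def pvRawKey (s : List Char) (k : Nat) : List Char :=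
  if s.getD k ' ' ≠ 'T' then [s.getD k ' ']
  else if k + 1 < s.length ∧ ¬ PySem.Chars.isupper (s.getD (k+1) ' ') = true then ['T', s.getD (k+1) ' ']
  else ['T']

theorem pvTok_mid (s : List Char) (a b : Nat) (hab : a < b) (hbn : b < s.length)
    (hu : PySem.Chars.isupper (s.getD a ' ') = true)
    (hub : PySem.Chars.isupper (s.getD b ' ') = true)
    (hgap : ∀ m, a < m → m < b → ¬ PySem.Chars.isupper (s.getD m ' ') = true) :
    pvKeyOfPart (PySem.List.slice s (some (a:Int)) (some (b:Int))) = pvRawKey s a := by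
  have ha : a < s.length := lt_trans hab hbn
  have hga : s.getD a ' ' = s[a] := List.getD_eq_getElem s ' ' ha
  have hua : PySem.Chars.isupper s[a] = true := by rw [← hga]; exact hu
  rw [PySem.List.slice_natCast]
  rw [List.drop_eq_getElem_cons ha]
  unfold pvRawKey
  rw [hga]
  by_cases hb1 : b = a + 1
  · subst hb1
    have h1 : (a + 1) - a = 1 := by omega
    rw [h1]
    simp only [List.take_succ_cons, List.take_zero]
    rw [pvKeyOfPart_singleton]
    by_cases hT : s[a] = 'T'
    · rw [if_neg (by simpa using hT), if_neg (fun hc => hc.2 hub), hT]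
    · rw [if_pos (by simpa using hT)]
  · have hb2 : a + 1 < b := by omega
    have ha1 : a + 1 < s.length := lt_trans hb2 hbn
    have hga1 : s.getD (a+1) ' ' = s[a+1] := List.getD_eq_getElem s ' ' ha1
    have hnu : ¬ PySem.Chars.isupper s[a+1] = true := by
      rw [← hga1]; exact hgap (a+1) (by omega) hb2
    have h1 : b - a = (b - a - 1) + 1 := by omega
    rw [h1, List.take_succ_cons]
    rw [List.drop_eq_getElem_cons ha1]
    have h2 : b - a - 1 = (b - a - 2) + 1 := by omega
    rw [h2, List.take_succ_cons]
    rw [pvKeyOfPart_cons_cons, hga1]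
    by_cases hT : s[a] = 'T'
    · rw [if_pos (by rw [hT]; decide), if_neg (by simpa using hT), if_pos ⟨ha1, hnu⟩, hT]
    · rw [if_neg (fun hc => hT ((pvLowerChar_eq_t_iff _ hua).mp hc)), if_pos (by simpa using hT)]

theorem pvTok_last (s : List Char) (a : Nat) (ha : a < s.length)
    (hu : PySem.Chars.isupper (s.getD a ' ') = true)
    (hgap : ∀ m, a < m → m < s.length → ¬ PySem.Chars.isupper (s.getD m ' ') = true) :
    pvKeyOfPart (PySem.List.slice s (some (a:Int)) none) = pvRawKey s a := by
  have hga : s.getD a ' ' = s[a] := List.getD_eq_getElem s ' ' ha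
  have hua : PySem.Chars.isupper s[a] = true := by rw [← hga]; exact hu
  rw [PySem.List.slice_from s (by positivity)]
  have hta : (a:Int).toNat = a := by omega
  rw [hta]
  rw [List.drop_eq_getElem_cons ha]
  unfold pvRawKey
  rw [hga]
  by_cases hend : a + 1 < s.length
  · have hga1 : s.getD (a+1) ' ' = s[a+1] := List.getD_eq_getElem s ' ' hend
    have hnu : ¬ PySem.Chars.isupper s[a+1] = true := by
      rw [← hga1]; exact hgap (a+1) (by omega) hend
    rw [List.drop_eq_getElem_cons hend]
    rw [pvKeyOfPart_cons_cons, hga1]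
    by_cases hT : s[a] = 'T'
    · rw [if_pos (by rw [hT]; decide), if_neg (by simpa using hT), if_pos ⟨hend, hnu⟩, hT]
    · rw [if_neg (fun hc => hT ((pvLowerChar_eq_t_iff _ hua).mp hc)), if_pos (by simpa using hT)]
  · have hnil : s.drop (a+1) = [] := List.drop_eq_nil_of_le (by omega)
    rw [hnil, pvKeyOfPart_singleton]
    by_cases hT : s[a] = 'T'
    · rw [if_neg (by simpa using hT), if_neg (fun hc => hend hc.1), hT]
    · rw [if_pos (by simpa using hT)]

theorem pvInc (u : List Nat) (hinc : u.Pairwise (· < ·)) {p q : Nat}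
    (hp : p < u.length) (hq : q < u.length) (hpq : p < q) : u[p] < u[q] :=
  (List.pairwise_iff_getElem.mp hinc) p q hp hq hpq

theorem pvGapG_mid (s : List Char) (u : List Nat) (hinc : u.Pairwise (· < ·))
    (hmem : ∀ k, k ∈ u ↔ k < s.length ∧ PySem.Chars.isupper (s.getD k ' ') = true)
    {p : Nat} (hp : p + 1 < u.length) :
    ∀ m, u[p] < m → m < u[p+1] → ¬ PySem.Chars.isupper (s.getD m ' ') = true := by
  intro m h1 h2 hm
  have hun : u[p+1] < s.length := ((hmem _).mp (List.getElem_mem hp)).1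
  have hmem' : m ∈ u := (hmem m).mpr ⟨by omega, hm⟩
  obtain ⟨q, hq, hqe⟩ := List.getElem_of_mem hmem'
  rcases Nat.lt_trichotomy q p with h | h | h
  · have := pvInc u hinc (p := q) (q := p) hq (by omega) h
    omega
  · subst h; omega
  · rcases Nat.lt_or_ge q (p+1) with h' | h'
    · have h'' : q = p + 1 := by omega
      subst h''; omega
    · rcases Nat.eq_or_lt_of_le h' with h'' | h''
      · subst h''; omega
      · have := pvInc u hinc (p := p+1) (q := q) hp hq h''
        omega

theorem pvGapG_last (s : List Char) (u : List Nat) (hinc : u.Pairwise (· < ·))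
    (hmem : ∀ k, k ∈ u ↔ k < s.length ∧ PySem.Chars.isupper (s.getD k ' ') = true)
    {p : Nat} (hp : p < u.length) (hlast : p + 1 = u.length) :
    ∀ m, u[p] < m → m < s.length → ¬ PySem.Chars.isupper (s.getD m ' ') = true := by
  intro m h1 h2 hm
  have hmem' : m ∈ u := (hmem m).mpr ⟨h2, hm⟩
  obtain ⟨q, hq, hqe⟩ := List.getElem_of_mem hmem'
  rcases Nat.lt_trichotomy q p with h | h | h
  · have := pvInc u hinc (p := q) (q := p) hq hp h
    omega
  · subst h; omega
  · omega

theorem pvZipKey (s : List Char) (u : List Nat) (hinc : u.Pairwise (· < ·))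
    (hmem : ∀ k, k ∈ u ↔ k < s.length ∧ PySem.Chars.isupper (s.getD k ' ') = true) :
    (((u.map (fun k : Nat => (k : Int))).zip
        (((u.map (fun k : Nat => (k : Int))).drop 1).map some ++ [none])).map
      (fun ij => pvKeyOfPart (PySem.List.slice s (some ij.1) ij.2)))
    = u.map (pvRawKey s) := by
  apply List.ext_getElem
  · simp [List.length_zip]
    omega
  · intro p hp1 hp2
    simp only [List.length_map] at hp2
    simp only [List.getElem_map, List.getElem_zip]
    have hfp : u[p] < s.length ∧ PySem.Chars.isupper (s.getD u[p] ' ') = true :=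
      (hmem _).mp (List.getElem_mem hp2)
    by_cases hlast : p + 1 < u.length
    · rw [List.getElem_append_left (by simp; omega)]
      rw [List.getElem_map (f := some)]
      rw [List.getElem_drop]
      rw [List.getElem_map]
      have hfp1 : u[p+1] < s.length ∧ PySem.Chars.isupper (s.getD u[p+1] ' ') = true :=
        (hmem _).mp (List.getElem_mem hlast)
      have h1p : (1:Nat) + p = p + 1 := Nat.add_comm 1 p
      simp only [h1p]
      exact pvTok_mid s u[p] u[p+1] (pvInc u hinc hp2 hlast (by omega)) hfp1.1
        hfp.2 hfp1.2 (pvGapG_mid s u hinc hmem hlast)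
    · rw [List.getElem_append_right (by simp; omega)]
      simp only [List.length_map, List.length_drop]
      have h0 : p - (u.length - 1) = 0 := by omega
      simp only [h0, List.getElem_cons_zero]
      exact pvTok_last s _ hfp.1 hfp.2 (pvGapG_last s u hinc hmem hp2 (by omega))

theorem pvA_parts (s : List Char) :
    ((((pvUpsFrom s 0).map (fun k : Nat => (k : Int))).zip
        ((((pvUpsFrom s 0).map (fun k : Nat => (k : Int))).drop 1).map some ++ [none])).map
      (fun ij => pvKeyOfPart (PySem.List.slice s (some ij.1) ij.2)))
    = (pvUpsFrom s 0).map (pvRawKey s) := by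
  exact pvZipKey s _ (pvPairwise_ups s 0)
    (fun k => by rw [pvMem_ups]; exact ⟨fun h => ⟨h.2.1, h.2.2⟩, fun h => ⟨Nat.zero_le _, h.1, h.2⟩⟩)

def pvBKey (s : List Char) (k : Nat) : List Char :=
  if PySem.Chars.lowerChar (s.getD k ' ') = 't' ∧ k + 1 < s.length ∧
      ¬ PySem.Chars.isupper (s.getD (k+1) ' ') = true
  then ['t', PySem.Chars.lowerChar (s.getD (k+1) ' ')]
  else [PySem.Chars.lowerChar (s.getD k ' ')]

theorem pvLower_raw (s : List Char) (k : Nat)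
    (hu : PySem.Chars.isupper (s.getD k ' ') = true) :
    PySem.Chars.lower (pvRawKey s k) = pvBKey s k := by
  unfold pvRawKey pvBKey
  by_cases hT : s.getD k ' ' = 'T'
  · rw [if_neg (by simpa using hT)]
    by_cases h2 : k + 1 < s.length ∧ ¬ PySem.Chars.isupper (s.getD (k+1) ' ') = true
    · rw [if_pos h2, if_pos (by exact ⟨by rw [hT]; decide, h2⟩)]
      rfl
    · rw [if_neg h2, if_neg (by intro hc; exact h2 hc.2)]
      rw [hT]; rfl
  · rw [if_pos (by simpa using hT)]
    rw [if_neg (by intro hc; exact hT ((pvLowerChar_eq_t_iff _ hu).mp hc.1))]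
    rfl

def pvTokShape (x : List Char) : Prop :=
  (∃ c, x = [c] ∧ PySem.Chars.isupper c = true) ∨
  (∃ d, x = ['T', d] ∧ ¬ PySem.Chars.isupper d = true)

theorem pvRaw_shape (s : List Char) (k : Nat)
    (hu : PySem.Chars.isupper (s.getD k ' ') = true) : pvTokShape (pvRawKey s k) := by
  unfold pvRawKey
  by_cases hT : s.getD k ' ' = 'T'
  · rw [if_neg (by simpa using hT)]
    by_cases h2 : k + 1 < s.length ∧ ¬ PySem.Chars.isupper (s.getD (k+1) ' ') = true
    · rw [if_pos h2]
      exact Or.inr ⟨_, rfl, h2.2⟩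
    · rw [if_neg h2]
      exact Or.inl ⟨'T', rfl, by decide⟩
  · rw [if_pos (by simpa using hT)]
    exact Or.inl ⟨_, rfl, hu⟩

theorem pvLowerChar_inj (c c' : Char) (hc : PySem.Chars.isupper c = true)
    (hc' : PySem.Chars.isupper c' = true)
    (h : PySem.Chars.lowerChar c = PySem.Chars.lowerChar c') : c = c' := by
  obtain ⟨h1, h2⟩ := pvUpperLe c hc
  obtain ⟨h1', h2'⟩ := pvUpperLe c' hc'
  unfold PySem.Chars.lowerChar at h
  rw [if_pos hc, if_pos hc'] at h
  have hv : (c.toNat + 32).isValidChar := Or.inl (by omega)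
  have hv' : (c'.toNat + 32).isValidChar := Or.inl (by omega)
  have := congrArg Char.toNat h
  rw [Char.toNat_ofNat, Char.toNat_ofNat, if_pos hv, if_pos hv'] at this
  have e1 : c.toNat = c.val.toNat := rfl
  have e2 : c'.toNat = c'.val.toNat := rfl
  exact Char.ext (UInt32.toNat_inj.mp (by omega))

theorem pvTokInj (x y : List Char) (hx : pvTokShape x) (hy : pvTokShape y)
    (h : PySem.Chars.lower x = PySem.Chars.lower y) : x = y := by
  rcases hx with ⟨c, rfl, hc⟩ | ⟨d, rfl, hd⟩ <;> rcases hy with ⟨c', rfl, hc'⟩ | ⟨d', rfl, hd'⟩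
  · have : PySem.Chars.lowerChar c = PySem.Chars.lowerChar c' := by
      simpa [PySem.Chars.lower] using h
    rw [pvLowerChar_inj c c' hc hc' this]
  · simp [PySem.Chars.lower] at h
  · simp [PySem.Chars.lower] at h
  · have : PySem.Chars.lowerChar d = PySem.Chars.lowerChar d' := by
      simpa [PySem.Chars.lower] using h
    rw [pvLowerChar_not_upper d hd, pvLowerChar_not_upper d' hd'] at this
    rw [this]

theorem pvOfList_map (f : List Char → List Char) :
    ∀ (xs : List (List Char)),
      (∀ a ∈ xs, ∀ b ∈ xs, f a = f b → a = b) →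
      (PySem.Set.ofList xs).map f = PySem.Set.ofList (xs.map f) := by
  intro xs
  induction xs using List.reverseRecOn with
  | nil => intro _; rfl
  | append_singleton xs x ih =>
    intro hinj
    rw [PySem.Set.ofList_append_singleton, List.map_append, List.map_cons, List.map_nil,
      PySem.Set.ofList_append_singleton]
    rw [← ih (fun a ha b hb => hinj a (by simp [ha]) b (by simp [hb]))]
    rw [PySem.Set.add_eq_ite, PySem.Set.add_eq_ite]
    by_cases hx : x ∈ PySem.Set.ofList xs
    · rw [if_pos hx, if_pos (by exact List.mem_map_of_mem hx)]
    · rw [if_neg hx, if_neg ?hh, List.map_append, List.map_cons, List.map_nil]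
      intro hc
      obtain ⟨y, hy, hye⟩ := List.mem_map.mp hc
      have hyx : y ∈ xs := (PySem.Set.mem_ofList _ _).mp hy
      have := hinj y (by simp [hyx]) x (by simp) hye
      exact hx (this ▸ hy)

def pvG (d : PySem.Dict (List Char) Int) : List (List Char) → PySem.Set (List Char) → Option Int
  | [], _ => some 0
  | k :: t, seen =>
    match PySem.Dict.get? d k with
    | none => none
    | some v => if k ∈ seen then pvG d t seen else (pvG d t (PySem.Set.add seen k)).map (fun x => v + x)

theorem pvG_char (d : PySem.Dict (List Char) Int) (ks : List (List Char)) :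
    ∀ (seen : PySem.Set (List Char)), (∀ k ∈ seen, (PySem.Dict.get? d k).isSome) →
    pvG d ks seen = if ks.all (fun k => (PySem.Dict.get? d k).isSome)
      then some (((PySem.Set.update seen ks).drop seen.length).map
        (fun k => (PySem.Dict.get? d k).getD 0)).sum
      else none := by
  induction ks with
  | nil =>
    intro seen _
    simp [pvG, PySem.Set.update_nil, List.drop_length]
  | cons k t ih =>
    intro seen hseen
    rw [PySem.Set.update_cons]
    cases hk : PySem.Dict.get? d k with
    | none =>
      simp only [pvG, hk]
      rw [if_neg (by simp [hk])]
    | some v =>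
      have hks : (PySem.Dict.get? d k).isSome := by simp [hk]
      simp only [pvG, hk]
      by_cases hmem : k ∈ seen
      · rw [if_pos hmem, PySem.Set.add_of_mem hmem, ih seen hseen]
        simp [hks]
      · rw [if_neg hmem, PySem.Set.add_of_not_mem hmem]
        rw [ih (seen ++ [k]) ?hs]
        case hs =>
          intro x hx
          rcases List.mem_append.mp hx with h | h
          · exact hseen x h
          · rw [List.mem_singleton.mp h]; exact hks
        have hpre := PySem.Set.update_eq_append_filter (seen ++ [k]) t
        have h1 : PySem.Set.update (seen ++ [k]) t
            = seen ++ (k :: (PySem.Set.ofList t).filter (fun y => !(PySem.Set.contains (seen ++ [k]) y))) := by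
          rw [hpre]; simp
        have h2 : (seen ++ (k :: (PySem.Set.ofList t).filter (fun y => !(PySem.Set.contains (seen ++ [k]) y)))).drop ((seen ++ [k]).length)
            = (PySem.Set.ofList t).filter (fun y => !(PySem.Set.contains (seen ++ [k]) y)) := by
          rw [show seen ++ (k :: (PySem.Set.ofList t).filter (fun y => !(PySem.Set.contains (seen ++ [k]) y)))
              = (seen ++ [k]) ++ (PySem.Set.ofList t).filter (fun y => !(PySem.Set.contains (seen ++ [k]) y)) from by simp]
          exact List.drop_left
        have h3 : (seen ++ (k :: (PySem.Set.ofList t).filter (fun y => !(PySem.Set.contains (seen ++ [k]) y)))).drop (seen.length)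
            = k :: (PySem.Set.ofList t).filter (fun y => !(PySem.Set.contains (seen ++ [k]) y)) :=
          List.drop_left
        rw [h1, h2, h3]
        by_cases hall : t.all (fun k => (PySem.Dict.get? d k).isSome)
        · rw [if_pos hall, if_pos (by simp [hall, hks])]
          simp [hk]
        · rw [if_neg hall, if_neg (by simp [hall]), Option.map_none]

theorem pvKey_port (s : List Char) (i : Nat) (h : i < s.length) :
    (if h2 : i + 1 < s.length then
        (if [PySem.Chars.lowerChar s[i]] = ['t'] ∧ ¬ pvAltIsUpper s[i+1] = true
         then ['t', PySem.Chars.lowerChar s[i+1]]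
         else [PySem.Chars.lowerChar s[i]])
      else [PySem.Chars.lowerChar s[i]]) = pvBKey s i := by
  have hga : s.getD i ' ' = s[i] := List.getD_eq_getElem s ' ' h
  unfold pvBKey
  rw [hga]
  by_cases h2 : i + 1 < s.length
  · have hga1 : s.getD (i+1) ' ' = s[i+1] := List.getD_eq_getElem s ' ' h2
    rw [dif_pos h2, hga1]
    by_cases hc : PySem.Chars.lowerChar s[i] = 't' ∧ ¬ PySem.Chars.isupper s[i+1] = true
    · rw [if_pos ⟨by rw [hc.1], hc.2⟩, if_pos ⟨hc.1, h2, hc.2⟩]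
    · rw [if_neg (fun hx => hc ⟨List.cons_eq_cons.mp hx.1 |>.1, hx.2⟩),
        if_neg (fun hx => hc ⟨hx.1, hx.2.2⟩)]
  · rw [dif_neg h2, if_neg (fun hx => h2 hx.2.1)]

theorem pvLoop_char (s : List Char) :
    ∀ (fuel i : Nat) (seen : PySem.Set (List Char)) (total : Int), s.length - i = fuel →
    pvAltLoop s i seen total
      = match pvG pvAltValues ((pvUpsFrom s i).map (pvBKey s)) seen with
        | none => 0
        | some m => total + m := by
  intro fuel
  induction fuel with
  | zero =>
    intro i seen total hf
    rw [pvAltLoop, dif_neg (by omega), pvUpsFrom_end s i (by omega)]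
    simp [pvG]
  | succ f ih =>
    intro i seen total hf
    have hi : i < s.length := by omega
    have hga : s.getD i ' ' = s[i] := List.getD_eq_getElem s ' ' hi
    rw [pvAltLoop, dif_pos hi, pvUpsFrom_step s i hi]
    by_cases hu : PySem.Chars.isupper (s.getD i ' ') = true
    · rw [if_pos hu]
      have hup : pvAltIsUpper s[i] = true := by rw [← hga]; exact hu
      rw [if_pos hup]
      simp only [List.map_cons]
      simp only [pvKey_port s i hi]
      simp only [pvG]
      cases hk : PySem.Dict.get? pvAltValues (pvBKey s i) with
      | none => rfl
      | some v =>
        simp only []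
        by_cases hmem : pvBKey s i ∈ seen
        · rw [if_pos hmem, if_pos hmem]
          exact ih (i+1) seen total (by omega)
        · rw [if_neg hmem, if_neg hmem]
          rw [ih (i+1) (PySem.Set.add seen (pvBKey s i)) (total + v) (by omega)]
          cases pvG pvAltValues ((pvUpsFrom s (i+1)).map (pvBKey s)) (PySem.Set.add seen (pvBKey s i)) with
          | none => rfl
          | some m => simp; ring
    · rw [if_neg hu]
      have hup : ¬ pvAltIsUpper s[i] = true := by rw [← hga]; exact hu
      rw [if_neg hup]
      exact ih (i+1) seen total (by omega)

theorem pvValues_eq : pvValues = pvAltValues := rfl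

theorem pvMapM_some {α : Type} (g : α → Option Int) :
    ∀ (l : List α), (∀ k ∈ l, (g k).isSome) →
      l.mapM g = some (l.map (fun k => (g k).getD 0)) := by
  intro l
  induction l with
  | nil => intro _; rfl
  | cons x t ih =>
    intro h
    have hx := h x (by simp)
    obtain ⟨v, hv⟩ := Option.isSome_iff_exists.mp hx
    rw [List.mapM_cons, hv, ih (fun k hk => h k (by simp [hk]))]
    simp [hv]

theorem pvMapM_none {α : Type} (g : α → Option Int) :
    ∀ (l : List α) (x : α), x ∈ l → g x = none → l.mapM g = none := by
  intro l
  induction l with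
  | nil => intro x hx; simp at hx
  | cons y t ih =>
    intro x hx hgx
    rw [List.mapM_cons]
    rcases List.mem_cons.mp hx with h | h
    · subst h; rw [hgx]; rfl
    · rw [ih x h hgx]
      cases g y <;> rfl

theorem pvSplits (s : List Char) :
    ((PySem.List.enumerate s).filter (fun p => PySem.Chars.isupper p.2)).map (fun p => p.1)
    = (pvUpsFrom s 0).map (fun k : Nat => (k : Int)) := by
  have h := pvEnumFilter s 0
  rw [show ((0:Nat):Int) = (0:Int) from rfl] at h
  rw [h, pvUpsFrom_zero]
  apply List.map_congr_left
  intro a ha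
  simp

theorem pvA_parts2 (s : List Char) :
    (((((pvUpsFrom s 0).map (fun k : Nat => (k : Int))).zip
        ((((pvUpsFrom s 0).map (fun k : Nat => (k : Int))).drop 1).map some ++ [none])).map
      (fun ij => PySem.List.slice s (some ij.1) ij.2)).map pvKeyOfPart)
    = (pvUpsFrom s 0).map (pvRawKey s) := by
  rw [List.map_map]
  have h := pvA_parts s
  simpa [Function.comp_def] using h

theorem pv_encode_eq (ds : String) : encode_days ds = encode_days_alt ds := by
  simp only [encode_days, encode_days_alt]
  by_cases hg : (PySem.Str.lower ds == "tba") = true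
  · rw [if_pos hg, if_pos hg]
  · rw [if_neg hg, if_neg hg]
    rw [pvSplits, pvA_parts2, pvValues_eq]
    rw [pvLoop_char ds.toList (ds.toList.length - 0) 0 [] 0 rfl]
    rw [pvG_char pvAltValues _ [] (by intro k hk; simp at hk)]
    set s := ds.toList with hs
    set u := pvUpsFrom s 0 with hu
    have hklower : (u.map (pvRawKey s)).map PySem.Chars.lower = u.map (pvBKey s) := by
      rw [List.map_map]
      apply List.map_congr_left
      intro k hk
      exact pvLower_raw s k ((pvMem_ups s 0 k).mp hk).2.2
    have hshape : ∀ x ∈ u.map (pvRawKey s), pvTokShape x := by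
      intro x hx
      obtain ⟨k, hk, rfl⟩ := List.mem_map.mp hx
      exact pvRaw_shape s k ((pvMem_ups s 0 k).mp hk).2.2
    have hinj : ∀ a ∈ u.map (pvRawKey s), ∀ b ∈ u.map (pvRawKey s),
        PySem.Chars.lower a = PySem.Chars.lower b → a = b :=
      fun a ha b hb h => pvTokInj a b (hshape a ha) (hshape b hb) h
    have hsets : (PySem.Set.ofList (u.map (pvRawKey s))).map PySem.Chars.lower
        = PySem.Set.ofList (u.map (pvBKey s)) := by
      rw [pvOfList_map _ _ hinj, hklower]
    by_cases hall : (u.map (pvBKey s)).all (fun k => (PySem.Dict.get? pvAltValues k).isSome)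
    · rw [if_pos hall]
      have hA : (PySem.Set.ofList (u.map (pvRawKey s))).mapM
          (fun day => PySem.Dict.get? pvAltValues (PySem.Chars.lower day))
          = some ((PySem.Set.ofList (u.map (pvRawKey s))).map
              (fun day => (PySem.Dict.get? pvAltValues (PySem.Chars.lower day)).getD 0)) := by
        apply pvMapM_some
        intro day hday
        have : PySem.Chars.lower day ∈ u.map (pvBKey s) := by
          rw [← hklower]
          exact List.mem_map_of_mem ((PySem.Set.mem_ofList _ _).mp hday)
        exact List.all_eq_true.mp hall _ this
      rw [hA]
      have hmaps : (PySem.Set.ofList (u.map (pvRawKey s))).map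
            (fun day => (PySem.Dict.get? pvAltValues (PySem.Chars.lower day)).getD 0)
          = (PySem.Set.ofList (u.map (pvBKey s))).map
            (fun k => (PySem.Dict.get? pvAltValues k).getD 0) := by
        rw [← hsets, List.map_map]
        rfl
      rw [hmaps]
      rw [PySem.Set.update_nil_left]
      simp
    · rw [if_neg hall]
      simp only [List.all_eq_true, not_forall] at hall
      obtain ⟨k, hk, hknone⟩ := hall
      have hkraw : k ∈ (u.map (pvRawKey s)).map PySem.Chars.lower := by rw [hklower]; exact hk
      obtain ⟨day, hday, hdaye⟩ := List.mem_map.mp hkraw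
      have hnone : PySem.Dict.get? pvAltValues (PySem.Chars.lower day) = none := by
        rw [hdaye]
        exact Option.not_isSome_iff_eq_none.mp hknone
      rw [pvMapM_none _ _ day ((PySem.Set.mem_ofList _ _).mpr hday) hnone]

-- ===== VERDICT (by name: the statement is the Claim_ definition above) =====
theorem encode_days_spec : Claim_equal_encode_days := by
  intro days_string _
  unfold Spec_encode_days
  exact pv_encode_eq days_string
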